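-- pv_equiv track=rewrite | github.com/Junx98/Task | Code Test/quiz.py | reverse_list_sol2
-- ===== SOURCE A (Python) =====
-- def reverse_list_sol2(l:list):
--
--     # Create an empty list to store the elements from roiginal list reversely
--     result = []
--
--     # Iterate through the original list in reverse order
--     for i in range(len(l) - 1, -1, -1):
--
--         # Append each element to the reversed list
--         result.append(l[i])
--
--     # Sort the reversed list without using built-in function
--     for i in range(len(l)):
--         for j in range(0, len(l) - i - 1):
--             if l[j] > l[j + 1]:
--                 # Swap if the elements are in the wrong order
--                 l[j], l[j + 1] = l[j + 1], l[j]
--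
--     return result
-- ===== SOURCE B (Python) =====
-- def reverse_list_sol2(l: list):
--     # Return value: reversed copy, taken before the in-place sort.
--     result = l[::-1]
--     # Side effect: stable in-place insertion sort (same strict '>' as A's bubble sort).
--     for i in range(1, len(l)):
--         key = l[i]
--         j = i - 1
--         while j >= 0 and l[j] > key:
--             l[j + 1] = l[j]
--             j -= 1
--         l[j + 1] = key
--     return result
-- ===== Notes on version B (the rewrite author's own statement) =====
-- stated objective: faster
-- what changed: The reversed return value is built by a single slice l[::-1] instead of an index-by-index append loop, and the in-place sorting side effect is an insertion sort (O(n) on sorted input) instead of an unconditionally quadratic bubble sort.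
import Mathlib
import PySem

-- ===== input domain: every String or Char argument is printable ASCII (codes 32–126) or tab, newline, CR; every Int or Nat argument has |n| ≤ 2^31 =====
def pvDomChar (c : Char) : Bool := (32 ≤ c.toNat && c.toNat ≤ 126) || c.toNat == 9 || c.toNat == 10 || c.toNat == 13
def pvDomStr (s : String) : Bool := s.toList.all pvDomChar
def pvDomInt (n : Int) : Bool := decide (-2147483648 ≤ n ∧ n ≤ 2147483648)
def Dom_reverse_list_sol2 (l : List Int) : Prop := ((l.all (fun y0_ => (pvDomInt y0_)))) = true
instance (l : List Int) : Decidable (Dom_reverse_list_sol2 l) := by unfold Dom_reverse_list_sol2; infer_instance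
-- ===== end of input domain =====

-- B returns the reversed copy via a slice instead of A's reverse-index append loop, and its
-- in-place sorting side effect is an insertion sort instead of bubble sort (same final sorted
-- list). Both A and B sort the argument in place in Python; Lean lists are immutable, so the
-- equivalence proved here is about the RETURN value only (the side effect coincides anyway).

-- ===== PORT A =====
-- result = []; for i in range(len(l)-1, -1, -1): result.append(l[i])
-- Every index produced by the range is in bounds, so Python's l[i] never raises; it is
-- ported exactly as pyGetD (the default 0 is never used). The subsequent bubble-sort loops
-- only mutate the argument l and never touch `result`; they have no return-value counterpart.
def reverse_list_sol2 (l : List Int) : List Int :=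
  (PySem.List.pyRange ((l.length : Int) - 1) (-1) (-1)).foldl
    (fun result i => result ++ [PySem.List.pyGetD l i 0]) []

-- ===== PORT B =====
-- result = l[::-1]  (never raises, so the Option from slice? is always some; getD ports it exactly)
def reverse_list_sol2_alt (l : List Int) : List Int :=
  (PySem.List.slice? l none none (-1)).getD []

-- ===== PRECONDITION & SPEC =====
def Spec_reverse_list_sol2 (l : List Int) (out : List Int) : Prop := out = reverse_list_sol2_alt l
instance (l : List Int) (out : List Int) : Decidable (Spec_reverse_list_sol2 l out) := by unfold Spec_reverse_list_sol2; infer_instance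

-- ===== CLAIM (what is proved, stated in full; the proofs are below) =====
def Claim_equal_reverse_list_sol2 : Prop := ∀ (l : List Int), Dom_reverse_list_sol2 l → Spec_reverse_list_sol2 l (reverse_list_sol2 l)

-- ===== LEMMAS AND PROOFS =====

-- A's countdown-index append loop builds exactly the reverse of l.
theorem reverse_list_sol2_eq_reverse (l : List Int) : reverse_list_sol2 l = l.reverse := by
  unfold reverse_list_sol2
  rw [PySem.List.foldl_append_singleton_eq_map, List.nil_append,
      PySem.List.pyRange_neg_one]
  have hn : ((l.length : Int) - 1 - (-1)).toNat = l.length := by omega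
  rw [List.map_map, hn]
  apply List.ext_getElem
  · simp
  · intro k hk hk'
    simp only [List.getElem_map, List.getElem_range, Function.comp_apply,
      List.getElem_reverse]
    have hklt : k < l.length := by simpa using hk
    have hidx : (l.length : Int) - 1 - (k : Int) = ((l.length - 1 - k : Nat) : Int) := by
      omega
    rw [hidx, PySem.List.pyGetD_natCast]
    have : l.length - 1 - k < l.length := by omega
    simp [this]

-- ===== VERDICT (by name: the statement is the Claim_ definition above) =====
theorem reverse_list_sol2_spec : Claim_equal_reverse_list_sol2 := by
  intro l _
  unfold Spec_reverse_list_sol2 reverse_list_sol2_alt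
  rw [PySem.List.slice?_none_none_neg_one, Option.getD_some,
      reverse_list_sol2_eq_reverse]
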